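-- pv_equiv track=rewrite | github.com/zaixizhang/STELLA | new_tools/esm2_embedder.py | _clean_sequence
-- ===== SOURCE A (Python) =====
-- def _clean_sequence(seq: str) -> tuple[str, int]:
--     """Clean and validate a protein sequence.
--
--     Returns (cleaned_sequence, num_replacements). Unrecognized tokens are replaced with 'X'.
--     """
--     allowed = set("ACDEFGHIKLMNPQRSTVWYBZXUOJ")  # common AA tokens + B,Z,X,U,O,J
--     s = (seq or "").strip().upper()
--     cleaned = []
--     repl = 0
--     for ch in s:
--         if ch in allowed:
--             cleaned.append(ch)
--         else:
--             cleaned.append('X')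
--             repl += 1
--     return ("".join(cleaned), repl)
-- ===== SOURCE B (Python) =====
-- _ALLOWED = "ACDEFGHIKLMNPQRSTVWYBZXUOJ"
-- # Translation table built once: every ASCII code maps to itself if allowed, else to 'X'.
-- _TABLE = {i: (chr(i) if chr(i) in _ALLOWED else 'X') for i in range(128)}
--
-- def _clean_sequence(seq: str) -> tuple[str, int]:
--     """Clean and validate a protein sequence via a translation table.
--
--     The cleaned string is produced by str.translate with a precomputed table;
--     the replacement count is len(s) minus the total occurrences of the allowed
--     letters (26 str.count passes) -- no explicit per-character loop or accumulator.
--     """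
--     s = (seq or "").strip().upper()
--     return (s.translate(_TABLE), len(s) - sum(s.count(c) for c in _ALLOWED))
-- ===== Notes on version B (the rewrite author's own statement) =====
-- stated objective: idiomatic
-- what changed: Replaces A's per-character loop with membership test, list accumulator and counter by a precomputed 128-entry translation table applied with str.translate for the cleaned string, and computes the replacement count arithmetically as len(s) minus the summed str.count occurrences of the 26 allowed letters (26 whole-string scans), with no explicit loop or accumulator.
import Mathlib
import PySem

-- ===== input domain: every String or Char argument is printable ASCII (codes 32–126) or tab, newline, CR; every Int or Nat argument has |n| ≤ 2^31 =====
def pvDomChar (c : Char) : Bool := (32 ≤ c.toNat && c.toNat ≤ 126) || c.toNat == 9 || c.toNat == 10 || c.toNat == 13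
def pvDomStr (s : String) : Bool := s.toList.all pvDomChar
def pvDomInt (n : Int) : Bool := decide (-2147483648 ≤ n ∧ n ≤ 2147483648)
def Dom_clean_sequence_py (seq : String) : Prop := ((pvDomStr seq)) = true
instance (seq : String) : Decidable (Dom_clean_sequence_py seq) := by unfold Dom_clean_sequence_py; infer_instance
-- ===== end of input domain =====

-- B replaces A's per-character loop (membership test + list accumulator + counter) by a precomputed
-- translation table applied with str.translate plus an arithmetic count (len minus summed str.count
-- of each allowed letter); idiomatic, same order of cost.


-- the allowed amino-acid tokens (module-level string _ALLOWED in B, set literal in A)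
def pvAllowedStr : List Char := "ACDEFGHIKLMNPQRSTVWYBZXUOJ".toList

-- ===== PORT A =====
def pvAllowed : PySem.Set Char := PySem.Set.ofList pvAllowedStr

def clean_sequence_py (seq : String) : String × Int :=
  let s0 := if seq = "" then "" else seq        -- (seq or "") : identical to seq for strings
  let s := PySem.Str.upper (PySem.Str.strip s0)
  let st := s.toList.foldl
    (fun st ch => if pvAllowed.contains ch then (st.1 ++ [ch], st.2) else (st.1 ++ ['X'], st.2 + 1))
    (([] : List Char), (0 : Int))
  (String.ofList st.1, st.2)

-- ===== PORT B =====
-- _TABLE = {i: (chr(i) if chr(i) in _ALLOWED else 'X') for i in range(128)}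
-- ('chr(i) in _ALLOWED' for the single character chr(i) is character membership in pvAllowedStr)
def pvTable : PySem.Dict Int Char :=
  (PySem.List.pyRange 0 128 1).foldl
    (fun d i =>
      d.insert i (if pvAllowedStr.contains (Char.ofNat i.toNat) then Char.ofNat i.toNat else 'X'))
    PySem.Dict.empty

def clean_sequence_py_alt (seq : String) : String × Int :=
  let s0 := if seq = "" then "" else seq
  let l := (PySem.Str.upper (PySem.Str.strip s0)).toList
  -- s.translate(_TABLE): every character is looked up by its code point, unchanged if absent
  (String.ofList (l.map (fun c => pvTable.getD (c.toNat : Int) c)),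
   -- len(s) - sum(s.count(c) for c in _ALLOWED); str.count of one character = its occurrence count
   (l.length : Int) - (pvAllowedStr.map (fun a => (l.count a : Int))).sum)

-- ===== PRECONDITION & SPEC =====
def Spec_clean_sequence_py (seq : String) (out : String × Int) : Prop := out = clean_sequence_py_alt seq
instance (seq : String) (out : String × Int) : Decidable (Spec_clean_sequence_py seq out) := by unfold Spec_clean_sequence_py; infer_instance

-- ===== CLAIM (what is proved, stated in full; the proofs are below) =====
def Claim_equal_clean_sequence_py : Prop := ∀ (seq : String), Dom_clean_sequence_py seq → Spec_clean_sequence_py seq (clean_sequence_py seq)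

-- ===== LEMMAS AND PROOFS =====

-- A's accumulator loop, characterized: it maps each char and counts the non-allowed ones.
theorem pv_loop (l acc : List Char) (r : Int) :
    l.foldl
      (fun st ch => if ch ∈ pvAllowed then (st.1 ++ [ch], st.2) else (st.1 ++ ['X'], st.2 + 1))
      (acc, r)
    = (acc ++ l.map (fun c => if c ∈ pvAllowed then c else 'X'),
       r + ((l.length : Int) - ((l.filter (fun c => decide (c ∈ pvAllowedStr))).length : Int))) := by
  induction l generalizing acc r with
  | nil => simp
  | cons c l ih =>
    by_cases h : c ∈ pvAllowed
    · have hc : c ∈ pvAllowedStr := by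
        simpa [pvAllowed, PySem.Set.mem_ofList] using h
      simp [h, hc, ih]
    · have hc : c ∉ pvAllowedStr := by
        simpa [pvAllowed, PySem.Set.mem_ofList] using h
      simp [h, hc, ih]
      ring

theorem pv_toNat_ofNat (n : Nat) (h : n < 128) : (Char.ofNat n).toNat = n := by
  have : n.isValidChar := Or.inl (by omega)
  simp [Char.ofNat, this, Char.ofNatAux, Char.toNat]

set_option maxRecDepth 40000 in
-- B's translation table, looked up at an ASCII code point, is A's per-character replacement.
theorem pv_table_getD (c : Char) (h : c.toNat < 128) :
    pvTable.getD (c.toNat : Int) c = if c ∈ pvAllowed then c else 'X' := by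
  have hall : ∀ n ∈ List.range 128,
      (pvTable.getD (n : Int) (Char.ofNat n)
        == (if Char.ofNat n ∈ pvAllowed then Char.ofNat n else 'X')) = true := by decide
  have := hall c.toNat (List.mem_range.mpr h)
  rw [Char.ofNat_toNat] at this
  exact eq_of_beq this

-- the characters of the stripped/uppercased string keep ASCII code points < 128
theorem pv_strip_mem (c : Char) (xs : List Char) (h : c ∈ PySem.Chars.strip xs) : c ∈ xs := by
  unfold PySem.Chars.strip PySem.Chars.rstrip PySem.Chars.lstrip at h
  have h1 := List.mem_reverse.mp h
  have h2 := (List.dropWhile_sublist _ (l := _)).mem h1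
  exact (List.dropWhile_sublist _ (l := xs)).mem (List.mem_reverse.mp h2)

theorem pv_upperChar_lt (c : Char) (h : c.toNat < 128) : (PySem.Chars.upperChar c).toNat < 128 := by
  unfold PySem.Chars.upperChar
  split
  · rw [pv_toNat_ofNat _ (by omega)]; omega
  · exact h

theorem pv_dom_lt (seq : String) (hdom : Dom_clean_sequence_py seq) :
    ∀ c ∈ (PySem.Str.upper (PySem.Str.strip seq)).toList, c.toNat < 128 := by
  intro c hc
  rw [PySem.Str.toList_upper, PySem.Str.toList_strip, PySem.Chars.upper, List.mem_map] at hc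
  obtain ⟨b, hb, rfl⟩ := hc
  have hbseq : b ∈ seq.toList := pv_strip_mem b _ hb
  have := List.all_eq_true.mp hdom b hbseq
  apply pv_upperChar_lt
  simp [pvDomChar] at this
  omega

-- Σ over a nodup list of the 0/1 indicator of one char is its membership indicator.
theorem pv_ind_sum (A : List Char) (hA : A.Nodup) (c : Char) :
    (A.map (fun a => if c = a then (1 : Int) else 0)).sum = if c ∈ A then 1 else 0 := by
  induction A with
  | nil => simp
  | cons a A ih =>
    rcases List.nodup_cons.mp hA with ⟨hna, hA'⟩
    by_cases h : c = a
    · subst h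
      simp [ih hA', hna]
    · simp [h, ih hA']

-- B's 26 count passes equal the number of allowed characters of l.
theorem pv_count_sum (l : List Char) :
    (pvAllowedStr.map (fun a => (l.count a : Int))).sum
      = ((l.filter (fun c => decide (c ∈ pvAllowedStr))).length : Int) := by
  induction l with
  | nil => simp
  | cons c t ih =>
    have hstep : (pvAllowedStr.map (fun a => ((c :: t).count a : Int))).sum
        = (pvAllowedStr.map (fun a => (t.count a : Int))).sum
          + (pvAllowedStr.map (fun a => if c = a then (1 : Int) else 0)).sum := by
      rw [← PySem.List.sum_map_add_int]
      congr 1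
      apply List.map_congr_left
      intro a _
      by_cases h : c = a <;> simp [h]
    rw [hstep, ih, pv_ind_sum pvAllowedStr (by decide) c]
    by_cases h : c ∈ pvAllowedStr <;> simp [h]

-- ===== VERDICT (by name: the statement is the Claim_ definition above) =====
theorem clean_sequence_py_spec : Claim_equal_clean_sequence_py := by
  intro seq hdom
  unfold Spec_clean_sequence_py clean_sequence_py clean_sequence_py_alt
  by_cases hs : seq = ""
  · subst hs; decide
  · simp only [if_neg hs]
    rw [pv_count_sum]
    have hlt := pv_dom_lt seq hdom
    have hmap : ((PySem.Str.upper (PySem.Str.strip seq)).toList.map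
          (fun c => pvTable.getD (c.toNat : Int) c))
        = (PySem.Str.upper (PySem.Str.strip seq)).toList.map
          (fun c => if c ∈ pvAllowed then c else 'X') := by
      apply List.map_congr_left
      intro c hc
      exact pv_table_getD c (hlt c hc)
    rw [hmap]
    simp [pv_loop]
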